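-- pv_equiv track=rewrite | github.com/Purvanshjain23/Repo_Indexing | Documentation_Generators/Quick_doc_generator.py | auto_priority
-- ===== SOURCE A (Python) =====
-- def auto_priority(func_name):
--     """Auto-assign priority level based on function importance"""
--     name = func_name.upper()
--
--     # Critical functions
--     if any(x in name for x in ['INIT', 'EXIT', 'MAIN', '*PSSR', '*INZSR', 'VLD', 'VALIDATE']):
--         return 'Critical'
--
--     # High priority
--     if any(x in name for x in ['PRO', 'PROCESS', 'ADD', 'UPD', 'UPDATE', 'CHG', 'DLT', 'DELETE', 'RTV', 'GET', 'DISPLAY', 'WRITE']):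
--         return 'High'
--
--     # Low priority
--     if any(x in name for x in ['SET', 'CLR', 'CLEAR', 'TST', 'TEST', 'RESET', 'REFRESH']):
--         return 'Low'
--
--     # Medium (default)
--     return 'Medium'
-- ===== SOURCE B (Python) =====
-- # B: flat (substring, rank) table + one collect-then-minimize pass, instead of A's ordered cascade of any() checks.
-- _TABLE = [
--     ('INIT', 0), ('EXIT', 0), ('MAIN', 0), ('*PSSR', 0), ('*INZSR', 0), ('VLD', 0), ('VALIDATE', 0),
--     ('PRO', 1), ('PROCESS', 1), ('ADD', 1), ('UPD', 1), ('UPDATE', 1), ('CHG', 1), ('DLT', 1),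
--     ('DELETE', 1), ('RTV', 1), ('GET', 1), ('DISPLAY', 1), ('WRITE', 1),
--     ('SET', 2), ('CLR', 2), ('CLEAR', 2), ('TST', 2), ('TEST', 2), ('RESET', 2), ('REFRESH', 2),
-- ]
-- _TIERS = ['Critical', 'High', 'Low', 'Medium']
--
-- def auto_priority(func_name):
--     name = func_name.upper()
--     best = 3
--     for sub, rank in _TABLE:
--         if sub in name:
--             best = min(best, rank)
--     return _TIERS[best]
-- ===== Notes on version B (the rewrite author's own statement) =====
-- stated objective: alternative
-- what changed: Replaces A's priority-ordered cascade of three any()-short-circuit checks with a single pass over a flat (substring, rank) table that minimizes the matched rank and maps it back to a tier name.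
import Mathlib
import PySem

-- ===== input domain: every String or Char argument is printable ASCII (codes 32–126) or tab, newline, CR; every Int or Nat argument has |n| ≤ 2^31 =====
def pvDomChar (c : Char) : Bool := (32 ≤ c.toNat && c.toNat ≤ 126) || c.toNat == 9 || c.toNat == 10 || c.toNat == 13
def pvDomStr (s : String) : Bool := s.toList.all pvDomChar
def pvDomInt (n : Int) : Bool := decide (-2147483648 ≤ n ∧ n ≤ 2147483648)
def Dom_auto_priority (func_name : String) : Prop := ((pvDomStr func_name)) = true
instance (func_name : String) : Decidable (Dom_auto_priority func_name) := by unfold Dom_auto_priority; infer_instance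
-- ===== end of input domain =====

-- B replaces A's ordered cascade of any()-checks with one collect-then-minimize pass over a flat (substring, rank) table; same result, same cost.


-- ===== PORT A =====
def auto_priority (func_name : String) : String :=
  let name := PySem.Str.upper func_name
  if (["INIT", "EXIT", "MAIN", "*PSSR", "*INZSR", "VLD", "VALIDATE"].any
      (fun x => PySem.Str.isIn x name)) then "Critical"
  else if (["PRO", "PROCESS", "ADD", "UPD", "UPDATE", "CHG", "DLT", "DELETE", "RTV", "GET", "DISPLAY", "WRITE"].any
      (fun x => PySem.Str.isIn x name)) then "High"
  else if (["SET", "CLR", "CLEAR", "TST", "TEST", "RESET", "REFRESH"].any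
      (fun x => PySem.Str.isIn x name)) then "Low"
  else "Medium"

-- ===== PORT B =====
def pvTable : List (String × Nat) :=
  [("INIT", 0), ("EXIT", 0), ("MAIN", 0), ("*PSSR", 0), ("*INZSR", 0), ("VLD", 0), ("VALIDATE", 0),
   ("PRO", 1), ("PROCESS", 1), ("ADD", 1), ("UPD", 1), ("UPDATE", 1), ("CHG", 1), ("DLT", 1),
   ("DELETE", 1), ("RTV", 1), ("GET", 1), ("DISPLAY", 1), ("WRITE", 1),
   ("SET", 2), ("CLR", 2), ("CLEAR", 2), ("TST", 2), ("TEST", 2), ("RESET", 2), ("REFRESH", 2)]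

def pvTiers : List String := ["Critical", "High", "Low", "Medium"]

def auto_priority_alt (func_name : String) : String :=
  let name := PySem.Str.upper func_name
  let best := pvTable.foldl
    (fun best p => if PySem.Str.isIn p.1 name then min best p.2 else best) 3
  -- _TIERS[best]: best is always in 0..3, so plain list indexing (getD's default is unreachable)
  pvTiers.getD best ""

-- ===== PRECONDITION & SPEC =====
def Spec_auto_priority (func_name : String) (out : String) : Prop := out = auto_priority_alt func_name
instance (func_name : String) (out : String) : Decidable (Spec_auto_priority func_name out) := by unfold Spec_auto_priority; infer_instance

-- ===== CLAIM (what is proved, stated in full; the proofs are below) =====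
def Claim_equal_auto_priority : Prop := ∀ (func_name : String), Dom_auto_priority func_name → Spec_auto_priority func_name (auto_priority func_name)

-- ===== LEMMAS AND PROOFS =====

-- folding min over a constant-rank segment of the table = one any() check
lemma pv_fold_map (name : String) (xs : List String) (r b0 : Nat) :
    (xs.map (fun s => (s, r))).foldl
      (fun best p => if PySem.Str.isIn p.1 name then min best p.2 else best) b0
    = if xs.any (fun x => PySem.Str.isIn x name) then min b0 r else b0 := by
  induction xs generalizing b0 with
  | nil => simp
  | cons x xs ih =>
    simp only [List.map_cons, List.foldl_cons, List.any_cons]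
    rw [ih]
    by_cases h1 : PySem.Str.isIn x name = true <;>
      by_cases h2 : (xs.any fun x => PySem.Str.isIn x name) = true <;>
        simp only [Bool.not_eq_true] at h1 h2 <;>
        simp only [h1, h2, Bool.or_true, Bool.or_false] <;>
        split_ifs <;> omega

lemma pv_table_split :
    pvTable = (["INIT", "EXIT", "MAIN", "*PSSR", "*INZSR", "VLD", "VALIDATE"].map (fun s => (s, 0)))
      ++ (["PRO", "PROCESS", "ADD", "UPD", "UPDATE", "CHG", "DLT", "DELETE", "RTV", "GET", "DISPLAY", "WRITE"].map (fun s => (s, 1)))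
      ++ (["SET", "CLR", "CLEAR", "TST", "TEST", "RESET", "REFRESH"].map (fun s => (s, 2))) := rfl

-- ===== VERDICT (by name: the statement is the Claim_ definition above) =====
theorem auto_priority_spec : Claim_equal_auto_priority := by
  intro f _
  unfold Spec_auto_priority
  simp only [auto_priority, auto_priority_alt]
  rw [pv_table_split, List.foldl_append, List.foldl_append, pv_fold_map, pv_fold_map, pv_fold_map]
  set name := PySem.Str.upper f
  cases hC : ["INIT", "EXIT", "MAIN", "*PSSR", "*INZSR", "VLD", "VALIDATE"].any
      (fun x => PySem.Str.isIn x name) <;>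
  cases hH : ["PRO", "PROCESS", "ADD", "UPD", "UPDATE", "CHG", "DLT", "DELETE", "RTV", "GET", "DISPLAY", "WRITE"].any
      (fun x => PySem.Str.isIn x name) <;>
  cases hL : ["SET", "CLR", "CLEAR", "TST", "TEST", "RESET", "REFRESH"].any
      (fun x => PySem.Str.isIn x name) <;>
  simp [pvTiers]
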